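-- pv_equiv track=rewrite | github.com/felipelazov/gardengreen | squads/squad-creator-pro/scripts/smoke-test-runner.py | extract_heuristics
-- ===== SOURCE A (Python) =====
-- def extract_heuristics(content: str) -> list:
--     """Extract heuristic rules from agent content."""
--     heuristics = []
--     current = {}
--     for line in content.split('\n'):
--         if 'id:' in line and ('TF_' in line or 'AN_' in line or 'PV_' in line or 'SC_' in line):
--             if current:
--                 heuristics.append(current)
--             current = {'id': line.split(':')[-1].strip().strip('"')}
--         elif 'name:' in line and current:
--             current['name'] = line.split(':', 1)[-1].strip().strip('"')
--         elif 'rule:' in line and current: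
--             current['rule'] = line.split(':', 1)[-1].strip().strip('"')
--         elif 'when:' in line and current:
--             current['when'] = line.split(':', 1)[-1].strip().strip('"')
--     if current:
--         heuristics.append(current)
--     return heuristics
-- ===== SOURCE B (Python) =====
-- def extract_heuristics(content: str) -> list:
--     """Extract heuristic rules: drop lines before the first header, cut the
--     rest into blocks at header lines, and parse each block independently."""
--
--     def is_header(line):
--         return 'id:' in line and ('TF_' in line or 'AN_' in line or 'PV_' in line or 'SC_' in line)
--
--     def parse_block(header, body):
--         d = {'id': header.split(':')[-1].strip().strip('"')}
--         for line in body: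
--             if 'name:' in line:
--                 d['name'] = line.split(':', 1)[-1].strip().strip('"')
--             elif 'rule:' in line:
--                 d['rule'] = line.split(':', 1)[-1].strip().strip('"')
--             elif 'when:' in line:
--                 d['when'] = line.split(':', 1)[-1].strip().strip('"')
--         return d
--
--     def blocks(lines):
--         if not lines:
--             return []
--         body = []
--         k = 1
--         while k < len(lines) and not is_header(lines[k]):
--             body.append(lines[k])
--             k += 1
--         return [parse_block(lines[0], body)] + blocks(lines[k:])
--
--     lines = content.split('\n')
--     i = 0
--     while i < len(lines) and not is_header(lines[i]):
--         i += 1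
--     return blocks(lines[i:])
-- ===== Notes on version B (the rewrite author's own statement) =====
-- stated objective: alternative
-- what changed: A threads a single stateful loop carrying (result list, current dict) over all lines; B first drops the pre-header prefix, cuts the lines into blocks at header lines, and parses each block independently into its dict.
import Mathlib
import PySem

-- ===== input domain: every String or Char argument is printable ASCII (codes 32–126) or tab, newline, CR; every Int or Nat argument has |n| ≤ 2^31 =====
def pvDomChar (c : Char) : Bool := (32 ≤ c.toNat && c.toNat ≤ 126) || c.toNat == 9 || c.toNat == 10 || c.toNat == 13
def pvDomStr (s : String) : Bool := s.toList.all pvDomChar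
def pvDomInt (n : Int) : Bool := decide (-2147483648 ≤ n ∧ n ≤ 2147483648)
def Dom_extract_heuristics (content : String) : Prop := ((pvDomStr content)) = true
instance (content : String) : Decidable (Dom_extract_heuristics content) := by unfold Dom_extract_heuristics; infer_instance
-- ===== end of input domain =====

-- B re-decomposes A's single stateful loop as drop-prefix / cut-into-blocks / parse-each-block (objective: simpler per-block structure, same cost).

-- ===== PORT A =====
-- one iteration of A's for-loop: state = (heuristics, current)
def pvStepA (st : List (PySem.Dict String String) × PySem.Dict String String) (line : String) :
    List (PySem.Dict String String) × PySem.Dict String String :=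
  if PySem.Str.isIn "id:" line &&
      (PySem.Str.isIn "TF_" line || PySem.Str.isIn "AN_" line ||
       PySem.Str.isIn "PV_" line || PySem.Str.isIn "SC_" line) then
    ((if st.2.items.isEmpty then st.1 else st.1 ++ [st.2]),
     PySem.Dict.insert PySem.Dict.empty "id"
       (PySem.Str.stripChars (PySem.Str.strip (((PySem.Str.split? line ":").getD []).getLastD "")) "\""))
  else if PySem.Str.isIn "name:" line && !st.2.items.isEmpty then
    (st.1, st.2.insert "name"
      (PySem.Str.stripChars (PySem.Str.strip (((PySem.Str.splitMax? line ":" 1).getD []).getLastD "")) "\""))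
  else if PySem.Str.isIn "rule:" line && !st.2.items.isEmpty then
    (st.1, st.2.insert "rule"
      (PySem.Str.stripChars (PySem.Str.strip (((PySem.Str.splitMax? line ":" 1).getD []).getLastD "")) "\""))
  else if PySem.Str.isIn "when:" line && !st.2.items.isEmpty then
    (st.1, st.2.insert "when"
      (PySem.Str.stripChars (PySem.Str.strip (((PySem.Str.splitMax? line ":" 1).getD []).getLastD "")) "\""))
  else st

-- A's final `if current: heuristics.append(current)`
def pvFin (st : List (PySem.Dict String String) × PySem.Dict String String) :
    List (PySem.Dict String String) :=
  if st.2.items.isEmpty then st.1 else st.1 ++ [st.2]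

def extract_heuristics (content : String) : List (List (String × String)) :=
  (pvFin (((PySem.Str.split? content "\n").getD []).foldl pvStepA ([], PySem.Dict.empty))).map (·.items)

-- ===== PORT B =====
def pvIsHeader (line : String) : Bool :=
  PySem.Str.isIn "id:" line &&
    (PySem.Str.isIn "TF_" line || PySem.Str.isIn "AN_" line ||
     PySem.Str.isIn "PV_" line || PySem.Str.isIn "SC_" line)

-- Source B's field-value expression line.split(':', 1)[-1].strip().strip('"')
def pvVal (line : String) : String :=
  PySem.Str.stripChars (PySem.Str.strip (((PySem.Str.splitMax? line ":" 1).getD []).getLastD "")) "\""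

def pvStepB (d : PySem.Dict String String) (line : String) : PySem.Dict String String :=
  if PySem.Str.isIn "name:" line then d.insert "name" (pvVal line)
  else if PySem.Str.isIn "rule:" line then d.insert "rule" (pvVal line)
  else if PySem.Str.isIn "when:" line then d.insert "when" (pvVal line)
  else d

def pvParseBlock (header : String) (body : List String) : PySem.Dict String String :=
  body.foldl pvStepB
    (PySem.Dict.empty.insert "id"
      (PySem.Str.stripChars (PySem.Str.strip (((PySem.Str.split? header ":").getD []).getLastD "")) "\""))

-- Source B's inner while loop in `blocks`: body lines before the next header, and the rest
def pvSpan : List String → List String × List String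
  | [] => ([], [])
  | l :: rest =>
    if pvIsHeader l then ([], l :: rest)
    else
      let p := pvSpan rest
      (l :: p.1, p.2)

theorem pvSpan_snd_length (ls : List String) : (pvSpan ls).2.length ≤ ls.length := by
  induction ls with
  | nil => simp [pvSpan]
  | cons l rest ih =>
    simp only [pvSpan]
    split
    · simp
    · simpa using Nat.le_succ_of_le ih

def pvBlocks : List String → List (PySem.Dict String String)
  | [] => []
  | l :: rest => pvParseBlock l (pvSpan rest).1 :: pvBlocks (pvSpan rest).2
termination_by ls => ls.length
decreasing_by exact Nat.lt_succ_of_le (pvSpan_snd_length rest)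

def extract_heuristics_alt (content : String) : List (List (String × String)) :=
  (pvBlocks (((PySem.Str.split? content "\n").getD []).dropWhile (fun l => !pvIsHeader l))).map (·.items)

-- ===== PRECONDITION & SPEC =====
def Spec_extract_heuristics (content : String) (out : List (List (String × String))) : Prop := out = extract_heuristics_alt content
instance (content : String) (out : List (List (String × String))) : Decidable (Spec_extract_heuristics content out) := by unfold Spec_extract_heuristics; infer_instance

-- ===== CLAIM (what is proved, stated in full; the proofs are below) =====
def Claim_equal_extract_heuristics : Prop := ∀ (content : String), Dom_extract_heuristics content → Spec_extract_heuristics content (extract_heuristics content)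

-- ===== LEMMAS AND PROOFS =====

theorem pv_insert_ne_nil {κ ν : Type} [BEq κ] (d : PySem.Dict κ ν) (k : κ) (v : ν) :
    (d.insert k v).items.isEmpty = false := by
  unfold PySem.Dict.insert
  split
  · rename_i h
    unfold PySem.Dict.contains at h
    cases hd : d.items with
    | nil => rw [hd] at h; simp at h
    | cons p t => simp
  · simp

theorem pvStepB_ne_nil (d : PySem.Dict String String) (line : String)
    (h : d.items.isEmpty = false) : (pvStepB d line).items.isEmpty = false := by
  unfold pvStepB
  split
  · exact pv_insert_ne_nil _ _ _
  · split
    · exact pv_insert_ne_nil _ _ _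
    · split
      · exact pv_insert_ne_nil _ _ _
      · exact h

theorem pvStepA_header (st : List (PySem.Dict String String) × PySem.Dict String String)
    (line : String) (h : pvIsHeader line = true) :
    pvStepA st line =
      ((if st.2.items.isEmpty then st.1 else st.1 ++ [st.2]),
       PySem.Dict.insert PySem.Dict.empty "id"
         (PySem.Str.stripChars (PySem.Str.strip (((PySem.Str.split? line ":").getD []).getLastD "")) "\"")) := by
  unfold pvStepA
  unfold pvIsHeader at h
  rw [if_pos h]

theorem pvStepA_nonheader (st : List (PySem.Dict String String) × PySem.Dict String String)
    (line : String) (h : pvIsHeader line = false) (hc : st.2.items.isEmpty = false) :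
    pvStepA st line = (st.1, pvStepB st.2 line) := by
  unfold pvStepA pvStepB
  unfold pvIsHeader at h
  rw [if_neg (by rw [h]; simp)]
  simp only [hc, Bool.not_false, Bool.and_true, pvVal]
  split_ifs <;> rfl

theorem pvStepA_empty_nonheader (line : String) (h : pvIsHeader line = false) :
    pvStepA ([], PySem.Dict.empty) line = ([], PySem.Dict.empty) := by
  unfold pvStepA
  unfold pvIsHeader at h
  rw [if_neg (by rw [h]; simp)]
  have he : (PySem.Dict.empty (κ := String) (ν := String)).items.isEmpty = true := rfl
  simp [he]

-- the core invariant: from a nonempty `current`, A's remaining loop produces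
-- exactly `current` finished by the body of its block, followed by B's blocks of the rest
theorem pv_main2 : ∀ (n : Nat) (ls : List String) (hs : List (PySem.Dict String String))
    (cur : PySem.Dict String String), ls.length ≤ n → cur.items.isEmpty = false →
    pvFin (ls.foldl pvStepA (hs, cur))
      = hs ++ (pvSpan ls).1.foldl pvStepB cur :: pvBlocks (pvSpan ls).2 := by
  intro n
  induction n with
  | zero =>
    intro ls hs cur hlen hc
    have : ls = [] := List.length_eq_zero_iff.mp (Nat.le_zero.mp hlen)
    subst this
    simp [pvSpan, pvBlocks, pvFin, hc]
  | succ n ih =>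
    intro ls hs cur hlen hc
    cases ls with
    | nil => simp [pvSpan, pvBlocks, pvFin, hc]
    | cons l rest =>
      by_cases hh : pvIsHeader l = true
      · rw [List.foldl_cons, pvStepA_header _ _ hh]
        simp only
        rw [if_neg (by simp [hc])]
        have hnew : (PySem.Dict.insert (PySem.Dict.empty (κ := String) (ν := String)) "id"
            (PySem.Str.stripChars (PySem.Str.strip (((PySem.Str.split? l ":").getD []).getLastD "")) "\"")).items.isEmpty = false :=
          pv_insert_ne_nil _ _ _
        rw [ih rest (hs ++ [cur]) _ (by simpa using Nat.lt_succ_iff.mp hlen) hnew]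
        rw [show pvSpan (l :: rest) = ([], l :: rest) from by simp [pvSpan, hh]]
        rw [show pvBlocks (l :: rest) = pvParseBlock l (pvSpan rest).1 :: pvBlocks (pvSpan rest).2 from by
          rw [pvBlocks]]
        simp [pvParseBlock]
      · have hh' : pvIsHeader l = false := by simpa using hh
        rw [List.foldl_cons, pvStepA_nonheader _ _ hh' hc]
        rw [ih rest hs (pvStepB cur l) (by simpa using Nat.lt_succ_iff.mp hlen)
          (pvStepB_ne_nil _ _ hc)]
        rw [show pvSpan (l :: rest) = (l :: (pvSpan rest).1, (pvSpan rest).2) from by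
          simp [pvSpan, hh']]
        simp

theorem pv_main1 : ∀ (ls : List String),
    pvFin (ls.foldl pvStepA ([], PySem.Dict.empty))
      = pvBlocks (ls.dropWhile (fun l => !pvIsHeader l)) := by
  intro ls
  induction ls with
  | nil => simp [pvBlocks]; rfl
  | cons l rest ih =>
    by_cases hh : pvIsHeader l = true
    · rw [List.foldl_cons, pvStepA_header _ _ hh]
      simp only
      have he : (PySem.Dict.empty (κ := String) (ν := String)).items.isEmpty = true := rfl
      rw [if_pos he]
      have hnew : (PySem.Dict.insert (PySem.Dict.empty (κ := String) (ν := String)) "id"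
          (PySem.Str.stripChars (PySem.Str.strip (((PySem.Str.split? l ":").getD []).getLastD "")) "\"")).items.isEmpty = false :=
        pv_insert_ne_nil _ _ _
      rw [pv_main2 rest.length rest [] _ (le_refl _) hnew]
      rw [show (l :: rest).dropWhile (fun l => !pvIsHeader l) = l :: rest from by
        simp [hh]]
      rw [show pvBlocks (l :: rest) = pvParseBlock l (pvSpan rest).1 :: pvBlocks (pvSpan rest).2 from by
        rw [pvBlocks]]
      simp [pvParseBlock]
    · have hh' : pvIsHeader l = false := by simpa using hh
      rw [List.foldl_cons, pvStepA_empty_nonheader _ hh']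
      rw [show (l :: rest).dropWhile (fun l => !pvIsHeader l) = rest.dropWhile (fun l => !pvIsHeader l) from by
        simp [hh']]
      exact ih

-- ===== VERDICT (by name: the statement is the Claim_ definition above) =====
theorem extract_heuristics_spec : Claim_equal_extract_heuristics := by
  intro content _
  unfold Spec_extract_heuristics extract_heuristics extract_heuristics_alt
  rw [pv_main1]
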